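-- pv_equiv track=rewrite | github.com/vsniadd2/uniqulizer | uniqulize.py | document_suffix_from_name
-- ===== SOURCE A (Python) =====
-- IMAGE_INPUT_SUFFIXES = frozenset(
--     {
--         ".jpg",
--         ".jpeg",
--         ".png",
--         ".webp",
--         ".bmp",
--         ".gif",
--         ".tif",
--         ".tiff",
--         ".heic",
--         ".heif",
--         ".avif",
--     }
-- )
--
-- VIDEO_INPUT_SUFFIXES = frozenset(
--     {
--         ".mp4",
--         ".mov",
--         ".m4v",
--         ".webm",
--         ".mkv",
--         ".avi",
--         ".mpeg",
--         ".mpg",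
--         ".m2ts",
--         ".ts",
--         ".flv",
--         ".wmv",
--         ".3gp",
--         ".ogv",
--     }
-- )
--
-- def document_suffix_from_name(name: str | None, fallback: str = ".bin") -> str:
--     if not name:
--         return fallback
--     n = name.lower()
--     for ext in sorted(IMAGE_INPUT_SUFFIXES | VIDEO_INPUT_SUFFIXES, key=len, reverse=True):
--         if n.endswith(ext):
--             return ext
--     return fallback
-- ===== SOURCE B (Python) =====
-- IMAGE_INPUT_SUFFIXES = frozenset(
--     {
--         ".jpg", ".jpeg", ".png", ".webp", ".bmp", ".gif", ".tif", ".tiff",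
--         ".heic", ".heif", ".avif",
--     }
-- )
--
-- VIDEO_INPUT_SUFFIXES = frozenset(
--     {
--         ".mp4", ".mov", ".m4v", ".webm", ".mkv", ".avi", ".mpeg", ".mpg",
--         ".m2ts", ".ts", ".flv", ".wmv", ".3gp", ".ogv",
--     }
-- )
--
-- KNOWN_SUFFIXES = IMAGE_INPUT_SUFFIXES | VIDEO_INPUT_SUFFIXES
--
-- def document_suffix_from_name(name: str | None, fallback: str = ".bin") -> str:
--     if not name:
--         return fallback
--     n = name.lower()
--     i = n.rfind(".")
--     if i == -1:
--         return fallback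
--     suffix = n[i:]
--     return suffix if suffix in KNOWN_SUFFIXES else fallback
-- ===== Notes on version B (the rewrite author's own statement) =====
-- stated objective: idiomatic
-- what changed: Replaces the length-sorted scan over all 25 extensions with extracting the actual suffix at the last dot (rfind) and one set-membership test.
import Mathlib
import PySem

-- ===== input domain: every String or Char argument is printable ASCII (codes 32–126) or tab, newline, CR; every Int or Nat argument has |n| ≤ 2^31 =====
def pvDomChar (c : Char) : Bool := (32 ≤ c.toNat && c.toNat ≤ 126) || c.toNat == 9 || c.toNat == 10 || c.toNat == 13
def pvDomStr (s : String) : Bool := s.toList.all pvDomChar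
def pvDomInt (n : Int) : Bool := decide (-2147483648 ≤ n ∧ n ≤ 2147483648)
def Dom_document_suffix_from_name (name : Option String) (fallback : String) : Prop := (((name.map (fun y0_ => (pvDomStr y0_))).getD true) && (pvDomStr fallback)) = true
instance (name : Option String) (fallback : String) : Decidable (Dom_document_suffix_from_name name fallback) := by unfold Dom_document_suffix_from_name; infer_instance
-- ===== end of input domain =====

-- B replaces A's length-sorted scan over all known extensions by extracting the suffix
-- at the last dot (rfind) and one membership test (objective: idiomatic).

-- Module-level constants shared by both versions (the two frozensets; their elements are
-- pairwise distinct, so the union is this list as a PySem.Set).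
def pvImageSuffixes : List String :=
  [".jpg", ".jpeg", ".png", ".webp", ".bmp", ".gif", ".tif", ".tiff", ".heic", ".heif", ".avif"]
def pvVideoSuffixes : List String :=
  [".mp4", ".mov", ".m4v", ".webm", ".mkv", ".avi", ".mpeg", ".mpg", ".m2ts", ".ts", ".flv", ".wmv", ".3gp", ".ogv"]
def pvAllSuffixes : PySem.Set String := PySem.Set.union (PySem.Set.ofList pvImageSuffixes) pvVideoSuffixes

-- ===== PORT A =====
-- the `for ext in …: if n.endswith(ext): return ext` loop
def pvFirstMatch (n : String) (fb : String) : List String → String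
  | [] => fb
  | e :: rest => if PySem.Str.endswith n e then e else pvFirstMatch n fb rest

-- Note: Python iterates the frozenset union in an unspecified order before sorting; the
-- returned value does not depend on that order (ties under `len` never both match).
def document_suffix_from_name (name : Option String) (fallback : String) : String :=
  match name with
  | none => fallback
  | some s =>
    if s = "" then fallback
    else
      let n := PySem.Str.lower s
      pvFirstMatch n fallback (PySem.List.sorted pvAllSuffixes (fun e => PySem.Str.len e) true)

-- ===== PORT B =====
def document_suffix_from_name_alt (name : Option String) (fallback : String) : String :=
  match name with
  | none => fallback
  | some s =>
    if s = "" then fallback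
    else
      let n := PySem.Str.lower s
      let i := PySem.Str.rfind n "."
      if i = -1 then fallback
      else
        let suffix := PySem.Str.slice n (some i) none
        if pvAllSuffixes.contains suffix then suffix else fallback

-- ===== PRECONDITION & SPEC =====
def Spec_document_suffix_from_name (name : Option String) (fallback : String) (out : String) : Prop := out = document_suffix_from_name_alt name fallback
instance (name : Option String) (fallback : String) (out : String) : Decidable (Spec_document_suffix_from_name name fallback out) := by unfold Spec_document_suffix_from_name; infer_instance

-- ===== CLAIM (what is proved, stated in full; the proofs are below) =====
def Claim_equal_document_suffix_from_name : Prop := ∀ (name : Option String) (fallback : String), Dom_document_suffix_from_name name fallback → Spec_document_suffix_from_name name fallback (document_suffix_from_name name fallback)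

-- ===== LEMMAS AND PROOFS =====

-- a well-formed extension (as a char list): a dot followed by a dot-free tail
def pvGoodExtC (l : List Char) : Bool :=
  (['.'] : List Char).isPrefixOf l && !(l.tail.contains '.')

set_option maxRecDepth 8192 in
lemma pvAll_good : ∀ e ∈ (pvAllSuffixes : List String), pvGoodExtC e.toList = true := by
  decide

lemma pvDotPrefix_iff (l : List Char) :
    (['.'] : List Char).isPrefixOf l = true ↔ ∃ r, l = '.' :: r := by
  rw [List.isPrefixOf_iff_prefix]
  cases l with
  | nil => simp
  | cons c t => simp [List.cons_prefix_cons, eq_comm]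

-- the unfolding equations of PySem.Chars.rfind.go
lemma pvGo_zero (s sub : List Char) :
    PySem.Chars.rfind.go s sub 0 = if sub.isPrefixOf s then (0 : Int) else -1 := by
  simp [PySem.Chars.rfind.go]

lemma pvGo_succ (s sub : List Char) (k : Nat) :
    PySem.Chars.rfind.go s sub (k + 1) =
      if sub.isPrefixOf (s.drop (k + 1)) then ((k + 1 : Nat) : Int)
      else PySem.Chars.rfind.go s sub k := by
  simp [PySem.Chars.rfind.go]

-- complete spec of the backwards scan: either no match at any position ≤ k, or the
-- greatest matching position ≤ k is returned
lemma pvGo_spec (s sub : List Char) (k : Nat) :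
    (PySem.Chars.rfind.go s sub k = -1 ∧ ∀ j ≤ k, sub.isPrefixOf (s.drop j) = false)
    ∨ (∃ j, j ≤ k ∧ sub.isPrefixOf (s.drop j) = true ∧
        PySem.Chars.rfind.go s sub k = (j : Int) ∧
        ∀ j', j < j' → j' ≤ k → sub.isPrefixOf (s.drop j') = false) := by
  induction k with
  | zero =>
    cases hpre : sub.isPrefixOf s with
    | true =>
      right
      exact ⟨0, le_refl _, by rw [List.drop_zero]; exact hpre,
        by simp [pvGo_zero, hpre], by omega⟩
    | false =>
      left
      refine ⟨by simp [pvGo_zero, hpre], ?_⟩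
      intro j hj
      interval_cases j
      rw [List.drop_zero]; exact hpre
  | succ k ih =>
    cases hpre : sub.isPrefixOf (s.drop (k + 1)) with
    | true =>
      right
      exact ⟨k + 1, le_refl _, hpre, by simp [pvGo_succ, hpre], by omega⟩
    | false =>
      rcases ih with ⟨h1, h2⟩ | ⟨j, hj, hm, he, hmax⟩
      · left
        refine ⟨by simp [pvGo_succ, hpre, h1], ?_⟩
        intro j hj
        rcases Nat.lt_or_ge j (k + 1) with hlt | hge
        · exact h2 j (by omega)
        · have : j = k + 1 := by omega
          subst this; exact hpre
      · right
        refine ⟨j, by omega, hm, by simp [pvGo_succ, hpre, he], ?_⟩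
        intro j' hlt hle
        rcases Nat.lt_or_ge j' (k + 1) with h' | h'
        · exact hmax j' hlt (by omega)
        · have : j' = k + 1 := by omega
          subst this; exact hpre

-- a good extension that is a suffix of m sits exactly at the last dot of m
lemma pvGood_suffix_spec (m e : List Char) (hg : pvGoodExtC e = true) (hs : e <:+ m) :
    (['.'] : List Char).isPrefixOf (m.drop (m.length - e.length)) = true ∧
    m.drop (m.length - e.length) = e ∧
    (∀ j, m.length - e.length < j → (['.'] : List Char).isPrefixOf (m.drop j) = false) := by
  obtain ⟨t, ht⟩ := hs
  unfold pvGoodExtC at hg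
  rw [Bool.and_eq_true] at hg
  obtain ⟨w, hw⟩ := (pvDotPrefix_iff e).mp hg.1
  have hnd : '.' ∉ w := by
    have := hg.2
    rw [hw] at this
    simpa using this
  have hlen : m.length - e.length = t.length := by
    subst ht; simp
  have hdrop : m.drop (m.length - e.length) = e := by
    rw [hlen, ← ht, List.drop_left]
  refine ⟨?_, hdrop, ?_⟩
  · rw [hdrop, hw, pvDotPrefix_iff]; exact ⟨w, rfl⟩
  · intro j hj
    rw [hlen] at hj
    by_contra hp
    rw [Bool.not_eq_false, pvDotPrefix_iff] at hp
    obtain ⟨r, hr⟩ := hp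
    have hdj : m.drop j = e.drop (j - t.length) := by
      have hjeq : j = t.length + (j - t.length) := by omega
      rw [← ht, hjeq, List.drop_length_add_append]
      congr 1
      omega
    have hdw : e.drop (j - t.length) = w.drop (j - t.length - 1) := by
      rw [hw]
      generalize hgen : j - t.length - 1 = k
      have hk1 : j - t.length = k + 1 := by omega
      rw [hk1, List.drop_succ_cons]
    have hmem : '.' ∈ w := by
      have h1 : '.' ∈ w.drop (j - t.length - 1) := by
        rw [← hdw, ← hdj, hr]; exact List.mem_cons_self
      exact List.mem_of_mem_drop h1
    exact hnd hmem

-- the loop returns the fallback when nothing matches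
lemma pvFirstMatch_none (n fb : String) (L : List String)
    (h : ∀ e ∈ L, PySem.Str.endswith n e = false) : pvFirstMatch n fb L = fb := by
  induction L with
  | nil => rfl
  | cons e rest ih =>
    simp only [pvFirstMatch, h e List.mem_cons_self]
    exact ih fun e' he' => h e' (List.mem_cons_of_mem _ he')

-- the loop returns x when x is in the list and matching is equivalent to being x
lemma pvFirstMatch_unique (n fb x : String) (L : List String) (hx : x ∈ L)
    (h : ∀ e ∈ L, PySem.Str.endswith n e = true ↔ e = x) : pvFirstMatch n fb L = x := by
  induction L with
  | nil => simp at hx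
  | cons e rest ih =>
    by_cases he : e = x
    · subst he
      simp only [pvFirstMatch, (h e List.mem_cons_self).mpr rfl, if_true]
    · have hne : PySem.Str.endswith n e = false := by
        rcases Bool.eq_false_or_eq_true (PySem.Str.endswith n e) with ht | hf
        · exact absurd ((h e List.mem_cons_self).mp ht) he
        · exact hf
      simp only [pvFirstMatch, hne, Bool.false_eq_true, if_false]
      exact ih ((List.mem_cons.mp hx).resolve_left fun h' => he h'.symm)
        (fun e' he' => h e' (List.mem_cons_of_mem _ he'))

-- core: for any string n, the sorted endswith-scan equals the rfind-based lookup
lemma pvKey (n fb : String) (L : List String) (K : PySem.Set String) (hLK : ∀ e, e ∈ L ↔ e ∈ (K : List String))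
    (hgood : ∀ e ∈ (K : List String), pvGoodExtC e.toList = true) :
    pvFirstMatch n fb L =
      (if PySem.Str.rfind n "." = -1 then fb
       else if PySem.Set.contains K (PySem.Str.slice n (some (PySem.Str.rfind n ".")) none)
            then PySem.Str.slice n (some (PySem.Str.rfind n ".")) none else fb) := by
  have hre : PySem.Str.rfind n "." = PySem.Chars.rfind.go n.toList ['.'] n.toList.length := by
    rw [PySem.Str.rfind_eq]; rfl
  rcases pvGo_spec n.toList ['.'] n.toList.length with ⟨h1, h2⟩ | ⟨j, hj, hm, he, hmax⟩
  · -- no dot anywhere: no extension matches, both sides give fb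
    rw [hre, h1, if_pos rfl]
    apply pvFirstMatch_none
    intro e heL
    cases hew : PySem.Str.endswith n e with
    | false => rfl
    | true =>
      rw [PySem.Str.endswith_eq, PySem.Chars.endswith_iff] at hew
      obtain ⟨hp, _, _⟩ := pvGood_suffix_spec n.toList e.toList (hgood e ((hLK e).mp heL)) hew
      have := h2 (n.toList.length - e.toList.length) (by omega)
      rw [this] at hp; exact absurd hp (by simp)
  · -- last dot at position j
    have hne : ((j : Nat) : Int) ≠ -1 := by omega
    rw [hre, he, if_neg hne]
    set suffix := PySem.Str.slice n (some ((j : Nat) : Int)) none with hsuf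
    have hsl : suffix.toList = n.toList.drop j := by
      rw [hsuf]
      simp [PySem.Str.slice, PySem.Chars.slice_eq_listSlice, PySem.List.slice_from_natCast]
    -- matching is equivalent to being the suffix at the last dot
    have hiff : ∀ e ∈ L, (PySem.Str.endswith n e = true ↔ e = suffix) := by
      intro e heL
      constructor
      · intro hew
        rw [PySem.Str.endswith_eq, PySem.Chars.endswith_iff] at hew
        obtain ⟨hp, hd, hup⟩ :=
          pvGood_suffix_spec n.toList e.toList (hgood e ((hLK e).mp heL)) hew
        have hle1 : n.toList.length - e.toList.length ≤ j := by
          by_contra hlt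
          have := hmax (n.toList.length - e.toList.length) (by omega) (by omega)
          rw [this] at hp; exact absurd hp (by simp)
        have hle2 : j ≤ n.toList.length - e.toList.length := by
          by_contra hlt
          have := hup j (by omega)
          rw [this] at hm; exact absurd hm (by simp)
        have hj' : (n.toList.length - e.toList.length) = j := by omega
        apply String.ext
        rw [hsl, ← hj', hd]
      · intro heq
        subst heq
        rw [PySem.Str.endswith_eq, PySem.Chars.endswith_iff, hsl]
        exact List.drop_suffix j n.toList
    by_cases hK : suffix ∈ (K : List String)
    · rw [if_pos ((PySem.Set.contains_iff K suffix).mpr hK)]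
      exact pvFirstMatch_unique n fb suffix L ((hLK suffix).mpr hK) hiff
    · rw [if_neg (fun hc => hK ((PySem.Set.contains_iff K suffix).mp hc))]
      apply pvFirstMatch_none
      intro e heL
      cases hew : PySem.Str.endswith n e with
      | false => rfl
      | true => exact absurd ((hLK e).mp heL) (by rw [(hiff e heL).mp hew]; exact hK)

-- ===== VERDICT (by name: the statement is the Claim_ definition above) =====
set_option maxHeartbeats 1000000 in
theorem document_suffix_from_name_spec : Claim_equal_document_suffix_from_name := by
  intro name fallback _hdom
  unfold Spec_document_suffix_from_name
  cases name with
  | none => rfl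
  | some s =>
    by_cases hs : s = ""
    · subst hs; rfl
    · have hk := pvKey (PySem.Str.lower s) fallback
        (PySem.List.sorted pvAllSuffixes (fun e => PySem.Str.len e) true) pvAllSuffixes
        (PySem.List.mem_sorted pvAllSuffixes (fun e => PySem.Str.len e) true) pvAll_good
      simp only [document_suffix_from_name, document_suffix_from_name_alt]
      rw [if_neg hs, if_neg hs, hk]
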